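-- pv_equiv track=rewrite | github.com/RaelMartinss/bot__orion | plugins/proximo_jogo.py | _escolher_time_correto
-- ===== SOURCE A (Python) =====
-- def _escolher_time_correto(teams: list[dict], team_name: str) -> dict | None:
--     """Escolhe o time correto priorizando Brasil e ligas conhecidas."""
--     if not teams:
--         return None
--
--     nome = team_name.lower()
--
--     if nome == "flamengo":
--         for team in teams:
--             country = (team.get("strCountry") or "").lower()
--             league = (team.get("strLeague") or "").lower()
--             alt_name = (team.get("strAlternate") or "").lower()
--             badge_name = (team.get("strTeam") or "").lower()
--             if (
--                 "brazil" in country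
--                 or "brasil" in country
--                 or "serie a" in league
--                 or "clube de regatas do flamengo" in alt_name
--                 or badge_name == "flamengo"
--             ):
--                 return team
--
--     for team in teams:
--         badge_name = (team.get("strTeam") or "").lower()
--         alt_name = (team.get("strAlternate") or "").lower()
--         if badge_name == nome or nome in alt_name:
--             return team
--
--     for team in teams:
--         country = (team.get("strCountry") or "").lower()
--         if "brazil" in country or "brasil" in country:
--             return team
--
--     return teams[0]
-- ===== SOURCE B (Python) =====
-- def _escolher_time_correto(teams, team_name):
--     if not teams:
--         return None
--     nome = team_name.lower()
--
--     def _priority(team):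
--         country = (team.get("strCountry") or "").lower()
--         badge_name = (team.get("strTeam") or "").lower()
--         alt_name = (team.get("strAlternate") or "").lower()
--         if nome == "flamengo":
--             league = (team.get("strLeague") or "").lower()
--             if ("brazil" in country or "brasil" in country
--                     or "serie a" in league
--                     or "clube de regatas do flamengo" in alt_name
--                     or badge_name == "flamengo"):
--                 return 1
--         if badge_name == nome or nome in alt_name:
--             return 2
--         if "brazil" in country or "brasil" in country:
--             return 3
--         return 4
--
--     return min(teams, key=_priority)
-- ===== Notes on version B (the rewrite author's own statement) =====
-- stated objective: simpler
-- what changed: Replaces A's three sequential find-first scans (flamengo loop, name/alt-name loop, Brazil loop) plus a teams[0] fallback by a single scored pass: a 4-tier priority function and min(teams, key=priority), whose first-minimum tie-breaking reproduces A's first-match-wins order.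
import Mathlib
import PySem

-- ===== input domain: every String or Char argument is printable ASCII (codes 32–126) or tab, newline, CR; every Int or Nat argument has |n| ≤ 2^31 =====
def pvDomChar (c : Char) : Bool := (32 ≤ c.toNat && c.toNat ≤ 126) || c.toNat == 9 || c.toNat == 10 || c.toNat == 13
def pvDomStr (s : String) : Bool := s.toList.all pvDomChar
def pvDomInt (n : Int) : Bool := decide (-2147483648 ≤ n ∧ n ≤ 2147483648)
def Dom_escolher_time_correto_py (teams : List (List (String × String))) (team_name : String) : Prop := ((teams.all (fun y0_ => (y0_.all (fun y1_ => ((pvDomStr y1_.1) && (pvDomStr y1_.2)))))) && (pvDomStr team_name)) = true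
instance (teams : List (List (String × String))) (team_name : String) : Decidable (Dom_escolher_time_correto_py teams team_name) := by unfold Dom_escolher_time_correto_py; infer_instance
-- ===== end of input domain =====

-- B replaces A's three sequential scans by a single scored pass: min(teams, key=priority); same return value, simpler.

-- shared helper: (team.get(k) or "").lower()  — both Pythons compute this field access
def pvField (team : List (String × String)) (k : String) : String :=
  PySem.Str.lower (((PySem.Dict.mk team).get? k).getD "")

-- the flamengo-loop condition of A (tier-1 condition of B)
def pvC1 (team : List (String × String)) : Bool :=
  PySem.Str.isIn "brazil" (pvField team "strCountry")
  || PySem.Str.isIn "brasil" (pvField team "strCountry")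
  || PySem.Str.isIn "serie a" (pvField team "strLeague")
  || PySem.Str.isIn "clube de regatas do flamengo" (pvField team "strAlternate")
  || (pvField team "strTeam" == "flamengo")

-- the name-match condition (tier 2)
def pvC2 (nome : String) (team : List (String × String)) : Bool :=
  (pvField team "strTeam" == nome) || PySem.Str.isIn nome (pvField team "strAlternate")

-- the Brazil condition (tier 3)
def pvC3 (team : List (String × String)) : Bool :=
  PySem.Str.isIn "brazil" (pvField team "strCountry")
  || PySem.Str.isIn "brasil" (pvField team "strCountry")

-- ===== PORT A =====  (three for-loops with early return = three find? scans, then teams[0])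
def pvBodyA (teams : List (List (String × String))) (nome : String) : Option (List (String × String)) :=
  match (if nome = "flamengo" then teams.find? (fun t => pvC1 t) else none) with
  | some t => some t
  | none =>
    match teams.find? (fun t => pvC2 nome t) with
    | some t => some t
    | none =>
      match teams.find? (fun t => pvC3 t) with
      | some t => some t
      | none => PySem.List.pyGet? teams 0

def escolher_time_correto_py (teams : List (List (String × String))) (team_name : String) : Option (List (String × String)) :=
  if teams = [] then none
  else pvBodyA teams (PySem.Str.lower team_name)

-- ===== PORT B =====  (one scored pass: min(teams, key=_priority))
def pvPriority (nome : String) (team : List (String × String)) : Nat :=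
  if nome = "flamengo" && pvC1 team then 1
  else if pvC2 nome team then 2
  else if pvC3 team then 3
  else 4

def escolher_time_correto_py_alt (teams : List (List (String × String))) (team_name : String) : Option (List (String × String)) :=
  if teams = [] then none
  else PySem.List.min? teams (pvPriority (PySem.Str.lower team_name))

-- ===== PRECONDITION & SPEC =====
def Spec_escolher_time_correto_py (teams : List (List (String × String))) (team_name : String) (out : Option (List (String × String))) : Prop := out = escolher_time_correto_py_alt teams team_name
instance (teams : List (List (String × String))) (team_name : String) (out : Option (List (String × String))) : Decidable (Spec_escolher_time_correto_py teams team_name out) := by unfold Spec_escolher_time_correto_py; infer_instance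

-- ===== CLAIM (what is proved, stated in full; the proofs are below) =====
def Claim_equal_escolher_time_correto_py : Prop := ∀ (teams : List (List (String × String))) (team_name : String), Dom_escolher_time_correto_py teams team_name → Spec_escolher_time_correto_py teams team_name (escolher_time_correto_py teams team_name)

-- ===== LEMMAS AND PROOFS =====

-- the running-min fold keeps its accumulator when nothing beats it
lemma pv_minFold_keep {α : Type} (key : α → Nat) :
    ∀ (l : List α) (m : α), (∀ u ∈ l, key m ≤ key u) →
      l.foldl (fun acc x => match acc with
        | none => some x
        | some m' => if key x < key m' then some x else some m') (some m) = some m := by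
  intro l
  induction l with
  | nil => intro m _; rfl
  | cons x t ih =>
    intro m h
    have hx : key m ≤ key x := h x (by simp)
    simp only [List.foldl_cons]
    rw [if_neg (by omega)]
    exact ih m (fun u hu => h u (by simp [hu]))

-- the running-min fold computes the FIRST element attaining the minimum value v
lemma pv_minFold_find {α : Type} (key : α → Nat) (v : Nat) :
    ∀ (l : List α) (acc : Option α),
      (∀ u ∈ l, v ≤ key u) → (∃ u ∈ l, key u = v) →
      (∀ m, acc = some m → v < key m) →
      l.foldl (fun acc x => match acc with
        | none => some x
        | some m' => if key x < key m' then some x else some m') acc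
        = l.find? (fun u => key u == v) := by
  intro l
  induction l with
  | nil => intro acc _ hex _; exact absurd hex (by simp)
  | cons x t ih =>
    intro acc hmin hex hacc
    simp only [List.foldl_cons]
    have hmin' : ∀ u ∈ t, v ≤ key u := fun u hu => hmin u (by simp [hu])
    by_cases hx : key x = v
    · have hfind : (x :: t).find? (fun u => key u == v) = some x := by
        simp [hx]
      rw [hfind]
      cases acc with
      | none =>
        exact pv_minFold_keep key t x (fun u hu => by have := hmin' u hu; omega)
      | some m =>
        have hm := hacc m rfl
        rw [show (match (some m : Option α) with
          | none => some x
          | some m' => if key x < key m' then some x else some m')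
            = (if key x < key m then some x else some m) from rfl]
        rw [if_pos (by omega)]
        exact pv_minFold_keep key t x (fun u hu => by have := hmin' u hu; omega)
    · have hvx : v < key x := by have := hmin x (by simp); omega
      have hex' : ∃ u ∈ t, key u = v := by
        rcases hex with ⟨u, hu, hkv⟩
        rcases List.mem_cons.mp hu with h | h
        · exact absurd (h ▸ hkv) hx
        · exact ⟨u, h, hkv⟩
      have hfind : (x :: t).find? (fun u => key u == v)
          = t.find? (fun u => key u == v) := by
        have hb : (key x == v) = false := by simp [hx]
        simp [hb]
      rw [hfind]
      cases acc with
      | none =>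
        exact ih (some x) hmin' hex' (fun m hm => by cases hm; exact hvx)
      | some m =>
        have hm := hacc m rfl
        rw [show (match (some m : Option α) with
          | none => some x
          | some m' => if key x < key m' then some x else some m')
            = (if key x < key m then some x else some m) from rfl]
        by_cases hlt : key x < key m
        · rw [if_pos hlt]
          exact ih (some x) hmin' hex' (fun m' hm' => by cases hm'; exact hvx)
        · rw [if_neg hlt]
          exact ih (some m) hmin' hex' (fun m' hm' => by cases hm'; exact hm)

-- min(l, key) is the first element whose key equals the minimum value v
lemma pv_min?_eq_find? {α : Type} (key : α → Nat) (v : Nat) (l : List α)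
    (hmin : ∀ u ∈ l, v ≤ key u) (hex : ∃ u ∈ l, key u = v) :
    PySem.List.min? l key = l.find? (fun u => key u == v) := by
  unfold PySem.List.min?
  exact pv_minFold_find key v l none hmin hex (by intro m hm; cases hm)

lemma pv_find?_congr {α : Type} (p q : α → Bool) :
    ∀ (l : List α), (∀ x ∈ l, p x = q x) → l.find? p = l.find? q := by
  intro l
  induction l with
  | nil => intro _; rfl
  | cons x t ih =>
    intro h
    have hx := h x (by simp)
    simp only [List.find?_cons, hx]
    cases q x with
    | true => rfl
    | false => exact ih (fun y hy => h y (by simp [hy]))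

-- priority facts
lemma pvPriority_pos (nome : String) (t : List (String × String)) :
    1 ≤ pvPriority nome t ∧ pvPriority nome t ≤ 4 := by
  unfold pvPriority; split_ifs <;> omega

lemma pvPriority_eq_one_iff (nome : String) (t : List (String × String)) :
    pvPriority nome t = 1 ↔ (nome = "flamengo" ∧ pvC1 t = true) := by
  unfold pvPriority
  split_ifs with h1 h2 h3 <;> simp_all

lemma pvPriority_eq_two_iff (nome : String) (t : List (String × String))
    (h1 : pvPriority nome t ≠ 1) :
    pvPriority nome t = 2 ↔ pvC2 nome t = true := by
  unfold pvPriority at *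
  split_ifs at * <;> simp_all

lemma pvPriority_eq_three_iff (nome : String) (t : List (String × String))
    (h1 : pvPriority nome t ≠ 1) (h2 : pvPriority nome t ≠ 2) :
    pvPriority nome t = 3 ↔ pvC3 t = true := by
  unfold pvPriority at *
  split_ifs at * <;> simp_all

-- ===== VERDICT (by name: the statement is the Claim_ definition above) =====
theorem escolher_time_correto_py_spec : Claim_equal_escolher_time_correto_py := by
  intro teams team_name _
  unfold Spec_escolher_time_correto_py escolher_time_correto_py escolher_time_correto_py_alt
  by_cases h0 : teams = []
  · simp [h0]
  · rw [if_neg h0, if_neg h0]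
    set nome := PySem.Str.lower team_name with hnome
    unfold pvBodyA
    by_cases he1 : ∃ t ∈ teams, pvPriority nome t = 1
    · -- tier 1 wins: nome = "flamengo" and the flamengo scan returns
      obtain ⟨t0, ht0, hpt0⟩ := he1
      have hfla : nome = "flamengo" := ((pvPriority_eq_one_iff nome t0).mp hpt0).1
      have hB : PySem.List.min? teams (pvPriority nome) = teams.find? (fun t => pvC1 t) := by
        rw [pv_min?_eq_find? (pvPriority nome) 1 teams
          (fun u _ => (pvPriority_pos nome u).1) ⟨t0, ht0, hpt0⟩]
        refine pv_find?_congr _ _ teams (fun x _ => ?_)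
        by_cases hc : pvC1 x = true
        · rw [hc]
          simp only [beq_iff_eq]
          exact (pvPriority_eq_one_iff nome x).mpr ⟨hfla, hc⟩
        · have hc' : pvC1 x = false := by simpa using hc
          rw [hc']
          simp only [beq_eq_false_iff_ne, ne_eq]
          exact fun h => hc ((pvPriority_eq_one_iff nome x).mp h).2
      have hsome : (teams.find? (fun t => pvC1 t)).isSome := by
        rw [List.find?_isSome]
        exact ⟨t0, ht0, ((pvPriority_eq_one_iff nome t0).mp hpt0).2⟩
      obtain ⟨w, hw⟩ := Option.isSome_iff_exists.mp hsome
      rw [hB, hw, if_pos hfla]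
    · -- no tier 1 anywhere: the flamengo scan (if it runs) finds nothing
      push_neg at he1
      have hne1 : ∀ t ∈ teams, pvPriority nome t ≠ 1 := he1
      have hfl_none : (if nome = "flamengo" then teams.find? (fun t => pvC1 t) else none) = none := by
        by_cases hfla : nome = "flamengo"
        · rw [if_pos hfla, List.find?_eq_none]
          intro x hx hc
          exact hne1 x hx ((pvPriority_eq_one_iff nome x).mpr ⟨hfla, by simpa using hc⟩)
        · exact if_neg hfla
      rw [hfl_none]
      by_cases he2 : ∃ t ∈ teams, pvPriority nome t = 2
      · obtain ⟨t0, ht0, hpt0⟩ := he2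
        have hB : PySem.List.min? teams (pvPriority nome) = teams.find? (fun t => pvC2 nome t) := by
          rw [pv_min?_eq_find? (pvPriority nome) 2 teams
            (fun u hu => by have := (pvPriority_pos nome u).1; have := hne1 u hu; omega)
            ⟨t0, ht0, hpt0⟩]
          refine pv_find?_congr _ _ teams (fun x hx => ?_)
          have hiff := pvPriority_eq_two_iff nome x (hne1 x hx)
          by_cases hc : pvC2 nome x = true
          · rw [hc]
            simp only [beq_iff_eq]
            exact hiff.mpr hc
          · have hc' : pvC2 nome x = false := by simpa using hc
            rw [hc']
            simp only [beq_eq_false_iff_ne, ne_eq]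
            exact fun h => hc (hiff.mp h)
        have hsome : (teams.find? (fun t => pvC2 nome t)).isSome := by
          rw [List.find?_isSome]
          exact ⟨t0, ht0, (pvPriority_eq_two_iff nome t0 (hne1 t0 ht0)).mp hpt0⟩
        obtain ⟨w, hw⟩ := Option.isSome_iff_exists.mp hsome
        rw [hB, hw]
      · push_neg at he2
        have hname_none : teams.find? (fun t => pvC2 nome t) = none := by
          rw [List.find?_eq_none]
          intro x hx hc
          exact he2 x hx ((pvPriority_eq_two_iff nome x (hne1 x hx)).mpr (by simpa using hc))
        rw [hname_none]
        by_cases he3 : ∃ t ∈ teams, pvPriority nome t = 3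
        · obtain ⟨t0, ht0, hpt0⟩ := he3
          have hB : PySem.List.min? teams (pvPriority nome) = teams.find? (fun t => pvC3 t) := by
            rw [pv_min?_eq_find? (pvPriority nome) 3 teams
              (fun u hu => by
                have := (pvPriority_pos nome u).1
                have := hne1 u hu; have := he2 u hu; omega)
              ⟨t0, ht0, hpt0⟩]
            refine pv_find?_congr _ _ teams (fun x hx => ?_)
            have hiff := pvPriority_eq_three_iff nome x (hne1 x hx) (he2 x hx)
            by_cases hc : pvC3 x = true
            · rw [hc]
              simp only [beq_iff_eq]
              exact hiff.mpr hc
            · have hc' : pvC3 x = false := by simpa using hc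
              rw [hc']
              simp only [beq_eq_false_iff_ne, ne_eq]
              exact fun h => hc (hiff.mp h)
          have hsome : (teams.find? (fun t => pvC3 t)).isSome := by
            rw [List.find?_isSome]
            exact ⟨t0, ht0, (pvPriority_eq_three_iff nome t0 (hne1 t0 ht0) (he2 t0 ht0)).mp hpt0⟩
          obtain ⟨w, hw⟩ := Option.isSome_iff_exists.mp hsome
          rw [hB, hw]
        · -- every priority is 4: min is the head, A falls back to teams[0]
          push_neg at he3
          have h4 : ∀ t ∈ teams, pvPriority nome t = 4 := by
            intro t ht
            have := (pvPriority_pos nome t).1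
            have := (pvPriority_pos nome t).2
            have := hne1 t ht; have := he2 t ht; have := he3 t ht; omega
          have hc3_none : teams.find? (fun t => pvC3 t) = none := by
            rw [List.find?_eq_none]
            intro x hx hc
            have h3 := (pvPriority_eq_three_iff nome x (hne1 x hx) (he2 x hx)).mpr (by simpa using hc)
            rw [h4 x hx] at h3
            omega
          rw [hc3_none]
          obtain ⟨x, rest, rfl⟩ := List.exists_cons_of_ne_nil h0
          have hB : PySem.List.min? (x :: rest) (pvPriority nome)
              = (x :: rest).find? (fun t => pvPriority nome t == 4) :=
            pv_min?_eq_find? (pvPriority nome) 4 _ (fun u hu => by rw [h4 u hu])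
              ⟨x, by simp, h4 x (by simp)⟩
          rw [hB]
          have hx4 : (pvPriority nome x == 4) = true := by simp [h4 x (by simp)]
          simp [hx4, PySem.List.pyGet?, PySem.List.pyIdx?]
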